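-- pv_equiv track=rewrite | github.com/ballales1984-wq/pythonita-ia | core/multi_comando.py | _combina_intelligente
-- ===== SOURCE A (Python) =====
-- from typing import List, Dict, Tuple
--
-- def _combina_intelligente(codici: List[str]) -> str:
--     """
--     Combina codici in modo intelligente.
--
--     - Unisce dichiarazioni di variabili
--     - Rimuove duplicati
--     - Mantiene l'ordine logico
--     """
--     risultato = []
--     variabili_definite = set()
--
--     for i, codice in enumerate(codici):
--         linee = codice.split('\n')
--
--         for linea in linee:
--             # Traccia variabili definite
--             if '=' in linea and not linea.strip().startswith('print'):
--                 var_name = linea.split('=')[0].strip()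
--                 variabili_definite.add(var_name)
--
--             risultato.append(linea)
--
--         # Aggiungi riga vuota tra blocchi (tranne l'ultimo)
--         if i < len(codici) - 1:
--             risultato.append('')
--
--     return '\n'.join(risultato)
-- ===== SOURCE B (Python) =====
-- def _combina_intelligente(codici):
--     """Combine code blocks: blocks joined by one blank line.
--
--     Splitting each block on '\n' and rejoining with '\n' is the identity,
--     and the variable-tracking set in the original is dead, so the whole
--     function is just a blank-line join of the blocks.
--     """
--     return '\n\n'.join(codici)
-- ===== Notes on version B (the rewrite author's own statement) =====
-- stated objective: simpler
-- what changed: B drops the per-line split/append loops and the dead variable-tracking set, returning the closed form '\n\n'.join(codici) instead of rebuilding the text line by line.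
import Mathlib
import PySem

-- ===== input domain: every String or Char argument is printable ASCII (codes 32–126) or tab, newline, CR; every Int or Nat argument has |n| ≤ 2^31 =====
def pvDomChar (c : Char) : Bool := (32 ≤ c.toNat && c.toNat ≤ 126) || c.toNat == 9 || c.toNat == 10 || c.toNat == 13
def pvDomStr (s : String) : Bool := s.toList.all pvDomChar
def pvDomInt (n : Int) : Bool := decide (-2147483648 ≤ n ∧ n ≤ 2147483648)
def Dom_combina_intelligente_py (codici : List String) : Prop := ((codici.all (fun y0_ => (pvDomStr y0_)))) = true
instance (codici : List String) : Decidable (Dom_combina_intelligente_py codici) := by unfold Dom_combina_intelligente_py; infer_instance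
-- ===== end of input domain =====

-- B replaces A's per-line split/append loops and dead variable-tracking set with a
-- closed-form blank-line join of the blocks (objective: simpler); return values are equal.

-- ===== PORT A =====
-- codice.split('\n') ('\n' is non-empty, so Python's split returns; the getD [] is never taken)
def pvLines (b : String) : List String := (PySem.Str.split? b "\n").getD []

-- one iteration of A's inner `for linea in linee` loop: track variables (dead), append the line
def pvLineStep (st : List String × PySem.Set String) (linea : String) :
    List String × PySem.Set String :=
  let vd := if PySem.Str.isIn "=" linea && !PySem.Str.startswith (PySem.Str.strip linea) "print"
    -- linea.split('=')[0]: split('=') is non-empty, so [0] is its head (headD never defaults)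
    then st.2.add (PySem.Str.strip (((PySem.Str.split? linea "=").getD []).headD ""))
    else st.2
  (st.1 ++ [linea], vd)

-- one iteration of A's outer `for i, codice in enumerate(codici)` loop
def pvBlockStep (n : Nat) (st : List String × PySem.Set String) (p : Int × String) :
    List String × PySem.Set String :=
  let linee := pvLines p.2
  let st2 := linee.foldl pvLineStep st
  if p.1 < (n : Int) - 1 then (st2.1 ++ [""], st2.2) else st2

def combina_intelligente_py (codici : List String) : String :=
  let st := (PySem.List.enumerate codici).foldl (pvBlockStep codici.length)
              ([], PySem.Set.ofList [])
  PySem.Str.join "\n" st.1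

-- ===== PORT B =====
def combina_intelligente_py_alt (codici : List String) : String :=
  PySem.Str.join "\n\n" codici

-- ===== PRECONDITION & SPEC =====
def Spec_combina_intelligente_py (codici : List String) (out : String) : Prop := out = combina_intelligente_py_alt codici
instance (codici : List String) (out : String) : Decidable (Spec_combina_intelligente_py codici out) := by unfold Spec_combina_intelligente_py; infer_instance

-- ===== CLAIM (what is proved, stated in full; the proofs are below) =====
def Claim_equal_combina_intelligente_py : Prop := ∀ (codici : List String), Dom_combina_intelligente_py codici → Spec_combina_intelligente_py codici (combina_intelligente_py codici)

-- ===== LEMMAS AND PROOFS =====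

-- the lines A's loops accumulate, indices starting at i, with n = len(codici)
def pvTail (n : Nat) : Int → List String → List String
  | _, [] => []
  | i, b :: bs => pvLines b ++ (if i < (n : Int) - 1 then [""] else []) ++ pvTail n (i + 1) bs

theorem pv_fst_lineFold (linee : List String) (st : List String × PySem.Set String) :
    (linee.foldl pvLineStep st).1 = st.1 ++ linee := by
  induction linee generalizing st with
  | nil => simp
  | cons a l ih => simp [List.foldl_cons, ih, pvLineStep]

theorem pv_fst_blockFold (n : Nat) (bs : List String) :
    ∀ (i : Int) (st : List String × PySem.Set String),
    ((PySem.List.enumerate bs i).foldl (pvBlockStep n) st).1 = st.1 ++ pvTail n i bs := by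
  induction bs with
  | nil => intro i st; simp [PySem.List.enumerate_nil, pvTail]
  | cons b bs ih =>
    intro i st
    rw [PySem.List.enumerate_cons, List.foldl_cons, ih]
    by_cases h : i < (n : Int) - 1 <;>
      simp [pvBlockStep, h, pv_fst_lineFold, pvTail]

theorem pv_map_toList_pvLines (b : String) :
    (pvLines b).map String.toList = PySem.Chars.splitOn b.toList ['\n'] := by
  simp [pvLines, PySem.Str.split?, PySem.Chars.split?, Function.comp_def]

theorem pv_go_ne_nil (sep : List Char) (fuel : Nat) :
    ∀ (l cur : List Char) (acc : List (List Char)),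
    PySem.Chars.splitOn.go sep fuel l cur acc ≠ [] := by
  induction fuel with
  | zero => intro l cur acc; simp [PySem.Chars.splitOn.go]
  | succ fuel ih =>
    intro l cur acc
    cases l with
    | nil => simp [PySem.Chars.splitOn.go]
    | cons c rest =>
      rw [PySem.Chars.splitOn.go]
      by_cases h : sep.isPrefixOf (c :: rest) = true
      · simp only [h, if_true]; exact ih _ _ _
      · simp only [h, Bool.false_eq_true, if_false]; exact ih _ _ _

theorem pv_splitOn_ne_nil (s sep : List Char) : PySem.Chars.splitOn s sep ≠ [] :=
  pv_go_ne_nil sep _ s [] []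

theorem pv_join_append (sep : List Char) (xs : List (List Char)) :
    ∀ (ys : List (List Char)), xs ≠ [] → ys ≠ [] →
    PySem.Chars.join sep (xs ++ ys) =
      PySem.Chars.join sep xs ++ sep ++ PySem.Chars.join sep ys := by
  induction xs with
  | nil => intro ys h; exact absurd rfl h
  | cons x xs ih =>
    intro ys _ hys
    cases xs with
    | nil =>
      cases ys with
      | nil => exact absurd rfl hys
      | cons y ys =>
        rw [List.singleton_append, PySem.Chars.join_cons_cons, PySem.Chars.join_singleton]
    | cons x' xs' =>
      rw [List.cons_append, List.cons_append, PySem.Chars.join_cons_cons,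
          PySem.Chars.join_cons_cons, ← List.cons_append,
          ih ys (by simp) hys]
      simp [List.append_assoc]

theorem pv_join_merge (c : Char) (A : List (List Char)) (x y : List Char) :
    PySem.Chars.join [c] (A ++ [x, y]) = PySem.Chars.join [c] (A ++ [x ++ c :: y]) := by
  cases A with
  | nil =>
    simp only [List.nil_append]
    rw [PySem.Chars.join_cons_cons, PySem.Chars.join_singleton, PySem.Chars.join_singleton]
    simp
  | cons a A =>
    rw [pv_join_append [c] (a :: A) [x, y] (by simp) (by simp),
        pv_join_append [c] (a :: A) [x ++ c :: y] (by simp) (by simp),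
        PySem.Chars.join_cons_cons, PySem.Chars.join_singleton, PySem.Chars.join_singleton]
    simp

theorem pv_goJ (c : Char) (fuel : Nat) :
    ∀ (l cur : List Char) (acc : List (List Char)), l.length < fuel →
    PySem.Chars.join [c] (PySem.Chars.splitOn.go [c] fuel l cur acc) =
      PySem.Chars.join [c] (((cur.reverse ++ l) :: acc).reverse) := by
  induction fuel with
  | zero => intro l cur acc h; omega
  | succ fuel ih =>
    intro l cur acc h
    cases l with
    | nil => simp [PySem.Chars.splitOn.go]
    | cons ch rest =>
      rw [PySem.Chars.splitOn.go]
      by_cases hc : c = ch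
      · subst hc
        have hp : [c].isPrefixOf (c :: rest) = true := by simp [List.isPrefixOf]
        simp only [hp, if_true, List.length_singleton]
        rw [List.drop_one, List.tail_cons,
            ih rest [] (cur.reverse :: acc) (by simp at h; omega)]
        simp only [List.reverse_nil, List.nil_append, List.reverse_cons]
        rw [List.append_assoc, ← pv_join_merge]
        simp
      · have hp : [c].isPrefixOf (ch :: rest) = false := by
          simp [List.isPrefixOf, hc]
        simp only [hp, Bool.false_eq_true, if_false]
        rw [ih rest (ch :: cur) acc (by simp at h; omega)]
        simp
  
theorem pv_join_splitOn (c : Char) (s : List Char) :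
    PySem.Chars.join [c] (PySem.Chars.splitOn s [c]) = s := by
  unfold PySem.Chars.splitOn
  rw [pv_goJ c (s.length + 1) s [] [] (by omega)]
  simp [PySem.Chars.join_singleton]

theorem pv_pvTail_map_ne_nil (n : Nat) (i : Int) (b : String) (bs : List String) :
    (pvTail n i (b :: bs)).map String.toList ≠ [] := by
  simp only [pvTail, List.map_append, pv_map_toList_pvLines, ne_eq, List.append_assoc]
  intro hemp
  rcases List.append_eq_nil_iff.mp hemp with ⟨h1, _⟩
  exact pv_splitOn_ne_nil _ _ h1

theorem pv_main_join (n : Nat) (bs : List String) :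
    ∀ (i : Int), i + bs.length = (n : Int) →
    PySem.Chars.join ['\n'] ((pvTail n i bs).map String.toList) =
      PySem.Chars.join ['\n', '\n'] (bs.map String.toList) := by
  induction bs with
  | nil => intro i h; simp [pvTail, PySem.Chars.join_nil]
  | cons b bs ih =>
    intro i h
    cases bs with
    | nil =>
      have hlt : ¬ i < (n : Int) - 1 := by simp at h; omega
      simp [pvTail, hlt, pv_map_toList_pvLines, pv_join_splitOn,
            PySem.Chars.join_singleton]
    | cons b' bs' =>
      have hlt : i < (n : Int) - 1 := by
        simp only [List.length_cons] at h; push_cast at h; omega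
      have hT := pv_pvTail_map_ne_nil n (i + 1) b' bs'
      obtain ⟨t, ts, hTt⟩ := List.exists_cons_of_ne_nil hT
      have hih := ih (i + 1) (by simp only [List.length_cons] at h ⊢; push_cast at h ⊢; omega)
      rw [pvTail]
      simp only [hlt, if_true, List.map_append, List.append_assoc]
      rw [pv_join_append ['\n'] _ _ (by simp [pv_map_toList_pvLines]; exact pv_splitOn_ne_nil _ _) (by simp)]
      rw [show ([""].map String.toList ++ (pvTail n (i+1) (b'::bs')).map String.toList)
            = [] :: (pvTail n (i+1) (b'::bs')).map String.toList by simp]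
      rw [hTt, PySem.Chars.join_cons_cons, ← hTt, hih,
          pv_map_toList_pvLines, pv_join_splitOn]
      simp [PySem.Chars.join_cons_cons]

-- ===== VERDICT (by name: the statement is the Claim_ definition above) =====
theorem combina_intelligente_py_spec : Claim_equal_combina_intelligente_py := by
  intro codici _
  unfold Spec_combina_intelligente_py combina_intelligente_py combina_intelligente_py_alt
  rw [← String.toList_inj, PySem.Str.toList_join, PySem.Str.toList_join,
      pv_fst_blockFold]
  simp only [List.nil_append]
  rw [show ("\n" : String).toList = ['\n'] from rfl,
      show ("\n\n" : String).toList = ['\n', '\n'] from rfl]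
  exact pv_main_join codici.length codici 0 (by simp)
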